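-- pv_equiv track=rewrite | github.com/zarkua/Defolancer | .agents/skills/defold-proto-file-editing/scripts/gen_convexshape.py | extract_boundary_pixels
-- ===== SOURCE A (Python) =====
-- def extract_boundary_pixels(coords: list[tuple[int, int]], width: int, height: int) -> list[tuple[int, int]]:
--     """Extract only boundary pixels from the silhouette to reduce point count before hull."""
--     pixel_set = set(coords)
--     boundary = []
--     for x, y in coords:
--         is_boundary = False
--         for dx, dy in [(-1, 0), (1, 0), (0, -1), (0, 1)]:
--             nx, ny = x + dx, y + dy
--             if nx < 0 or nx >= width or ny < 0 or ny >= height or (nx, ny) not in pixel_set: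
--                 is_boundary = True
--                 break
--         if is_boundary:
--             boundary.append((x, y))
--     return boundary
-- ===== SOURCE B (Python) =====
-- def extract_boundary_pixels(coords: list[tuple[int, int]], width: int, height: int) -> list[tuple[int, int]]:
--     """Extract only boundary pixels from the silhouette to reduce point count before hull."""
--     pixel_set = set(coords)
--     interior = set(pixel_set)
--     for dx, dy in ((-1, 0), (1, 0), (0, -1), (0, 1)):
--         interior &= {(x - dx, y - dy) for (x, y) in pixel_set}
--     interior = {(x, y) for (x, y) in interior
--                 if 1 <= x <= width - 2 and 1 <= y <= height - 2}
--     return [p for p in coords if p not in interior]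
-- ===== Notes on version B (the rewrite author's own statement) =====
-- stated objective: alternative
-- what changed: Replaces the per-pixel neighbor-scan with inner break by whole-set algebra: intersect the pixel set with its four translated copies and a bounds restriction to get the interior set once, then filter the original coords against it.
import Mathlib
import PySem

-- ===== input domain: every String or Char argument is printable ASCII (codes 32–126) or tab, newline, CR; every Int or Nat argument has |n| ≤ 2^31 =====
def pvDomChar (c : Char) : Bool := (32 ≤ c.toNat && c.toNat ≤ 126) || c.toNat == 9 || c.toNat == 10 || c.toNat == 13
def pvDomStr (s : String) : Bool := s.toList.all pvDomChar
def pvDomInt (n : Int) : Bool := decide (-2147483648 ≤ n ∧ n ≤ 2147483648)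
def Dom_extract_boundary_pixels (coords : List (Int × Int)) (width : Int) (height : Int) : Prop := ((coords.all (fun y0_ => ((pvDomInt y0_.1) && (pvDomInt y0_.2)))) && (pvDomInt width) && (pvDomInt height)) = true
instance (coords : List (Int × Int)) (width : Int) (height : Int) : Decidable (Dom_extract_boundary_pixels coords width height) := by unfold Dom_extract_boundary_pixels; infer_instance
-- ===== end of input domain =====

-- B replaces A's per-pixel four-neighbor scan by set algebra (intersection of the
-- pixel set with its four shifts, restricted to interior bounds); equal results, similar cost.

-- ===== PORT A =====
-- inner 'for dx, dy in [...]' loop with break: recursion over the direction list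
def pvDirLoop (pixel_set : PySem.Set (Int × Int)) (width height x y : Int) :
    List (Int × Int) → Bool
  | [] => false
  | d :: rest =>
    let nx := x + d.1
    let ny := y + d.2
    if nx < 0 ∨ nx ≥ width ∨ ny < 0 ∨ ny ≥ height ∨ ¬ (nx, ny) ∈ pixel_set then true
    else pvDirLoop pixel_set width height x y rest

def extract_boundary_pixels (coords : List (Int × Int)) (width : Int) (height : Int) : List (Int × Int) :=
  let pixel_set : PySem.Set (Int × Int) := PySem.Set.ofList coords
  coords.foldl (fun boundary p =>
    let is_boundary := pvDirLoop pixel_set width height p.1 p.2 [(-1, 0), (1, 0), (0, -1), (0, 1)]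
    if is_boundary then boundary ++ [(p.1, p.2)] else boundary) []

-- ===== PORT B =====
def extract_boundary_pixels_alt (coords : List (Int × Int)) (width : Int) (height : Int) : List (Int × Int) :=
  let pixel_set : PySem.Set (Int × Int) := PySem.Set.ofList coords
  let interior0 : PySem.Set (Int × Int) :=
    ([(-1, 0), (1, 0), (0, -1), (0, 1)] : List (Int × Int)).foldl
      (fun s d => PySem.Set.inter s
        (PySem.Set.ofList (pixel_set.map (fun q => (q.1 - d.1, q.2 - d.2))))) pixel_set
  let interior : PySem.Set (Int × Int) :=
    interior0.filter (fun q => decide (1 ≤ q.1 ∧ q.1 ≤ width - 2 ∧ 1 ≤ q.2 ∧ q.2 ≤ height - 2))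
  coords.filter (fun p => !(PySem.Set.contains interior p))

-- ===== PRECONDITION & SPEC =====
def Spec_extract_boundary_pixels (coords : List (Int × Int)) (width : Int) (height : Int) (out : List (Int × Int)) : Prop := out = extract_boundary_pixels_alt coords width height
instance (coords : List (Int × Int)) (width : Int) (height : Int) (out : List (Int × Int)) : Decidable (Spec_extract_boundary_pixels coords width height out) := by unfold Spec_extract_boundary_pixels; infer_instance

-- ===== CLAIM (what is proved, stated in full; the proofs are below) =====
def Claim_equal_extract_boundary_pixels : Prop := ∀ (coords : List (Int × Int)) (width : Int) (height : Int), Dom_extract_boundary_pixels coords width height → Spec_extract_boundary_pixels coords width height (extract_boundary_pixels coords width height)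

-- ===== LEMMAS AND PROOFS =====
lemma mem_shifted (S : PySem.Set (Int × Int)) (a b x y : Int) :
    (x, y) ∈ PySem.Set.ofList (S.map (fun q => (q.1 - a, q.2 - b))) ↔ (x + a, y + b) ∈ S := by
  rw [PySem.Set.mem_ofList, List.mem_map]
  constructor
  · rintro ⟨⟨u, v⟩, hm, he⟩
    have h1 : u - a = x := congrArg Prod.fst he
    have h2 : v - b = y := congrArg Prod.snd he
    have : (x + a, y + b) = (u, v) := by
      rw [Prod.mk.injEq]; omega
    rw [this]; exact hm
  · intro h
    exact ⟨(x + a, y + b), h, by simp⟩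

lemma predicate_eq (coords : List (Int × Int)) (width height : Int) (p : Int × Int)
    (hp : p ∈ coords) :
    pvDirLoop (PySem.Set.ofList coords) width height p.1 p.2 [(-1, 0), (1, 0), (0, -1), (0, 1)]
      = !(PySem.Set.contains
          ((([(-1, 0), (1, 0), (0, -1), (0, 1)] : List (Int × Int)).foldl
              (fun s d => PySem.Set.inter s
                (PySem.Set.ofList ((PySem.Set.ofList coords).map (fun q => (q.1 - d.1, q.2 - d.2))))) (PySem.Set.ofList coords)).filter
            (fun q => decide (1 ≤ q.1 ∧ q.1 ≤ width - 2 ∧ 1 ≤ q.2 ∧ q.2 ≤ height - 2))) p) := by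
  obtain ⟨x, y⟩ := p
  have hpS : (x, y) ∈ PySem.Set.ofList coords := (PySem.Set.mem_ofList _ _).2 hp
  simp only [List.foldl_cons, List.foldl_nil, pvDirLoop]
  have hmem : (x, y) ∈ List.filter (fun q => decide (1 ≤ q.1 ∧ q.1 ≤ width - 2 ∧ 1 ≤ q.2 ∧ q.2 ≤ height - 2))
      (((((PySem.Set.ofList coords).inter
            (PySem.Set.ofList (List.map (fun q => (q.1 - -1, q.2 - 0)) (PySem.Set.ofList coords)))).inter
          (PySem.Set.ofList (List.map (fun q => (q.1 - 1, q.2 - 0)) (PySem.Set.ofList coords)))).inter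
        (PySem.Set.ofList (List.map (fun q => (q.1 - 0, q.2 - -1)) (PySem.Set.ofList coords)))).inter
        (PySem.Set.ofList (List.map (fun q => (q.1 - 0, q.2 - 1)) (PySem.Set.ofList coords)))) ↔
      ((1 ≤ x ∧ x ≤ width - 2 ∧ 1 ≤ y ∧ y ≤ height - 2) ∧
        (x + -1, y + 0) ∈ PySem.Set.ofList coords ∧ (x + 1, y + 0) ∈ PySem.Set.ofList coords ∧
        (x + 0, y + -1) ∈ PySem.Set.ofList coords ∧ (x + 0, y + 1) ∈ PySem.Set.ofList coords) := by
    rw [List.mem_filter]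
    simp only [PySem.Set.mem_inter, mem_shifted, decide_eq_true_eq]
    tauto
  have hiff : (if x + -1 < 0 ∨ x + -1 ≥ width ∨ y + 0 < 0 ∨ y + 0 ≥ height ∨ (x + -1, y + 0) ∉ PySem.Set.ofList coords then true
      else if x + 1 < 0 ∨ x + 1 ≥ width ∨ y + 0 < 0 ∨ y + 0 ≥ height ∨ (x + 1, y + 0) ∉ PySem.Set.ofList coords then true
      else if x + 0 < 0 ∨ x + 0 ≥ width ∨ y + -1 < 0 ∨ y + -1 ≥ height ∨ (x + 0, y + -1) ∉ PySem.Set.ofList coords then true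
      else if x + 0 < 0 ∨ x + 0 ≥ width ∨ y + 1 < 0 ∨ y + 1 ≥ height ∨ (x + 0, y + 1) ∉ PySem.Set.ofList coords then true
      else false) = true ↔
      ¬ ((1 ≤ x ∧ x ≤ width - 2 ∧ 1 ≤ y ∧ y ≤ height - 2) ∧
        (x + -1, y + 0) ∈ PySem.Set.ofList coords ∧ (x + 1, y + 0) ∈ PySem.Set.ofList coords ∧
        (x + 0, y + -1) ∈ PySem.Set.ofList coords ∧ (x + 0, y + 1) ∈ PySem.Set.ofList coords) := by
    split_ifs with h1 h2 h3 h4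
    · refine ⟨fun _ => ?_, fun _ => rfl⟩
      rintro ⟨⟨b1, b2, b3, b4⟩, m1, m2, m3, m4⟩
      rcases h1 with h | h | h | h | h <;> first | omega | exact h m1
    · refine ⟨fun _ => ?_, fun _ => rfl⟩
      rintro ⟨⟨b1, b2, b3, b4⟩, m1, m2, m3, m4⟩
      rcases h2 with h | h | h | h | h <;> first | omega | exact h m2
    · refine ⟨fun _ => ?_, fun _ => rfl⟩
      rintro ⟨⟨b1, b2, b3, b4⟩, m1, m2, m3, m4⟩
      rcases h3 with h | h | h | h | h <;> first | omega | exact h m3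
    · refine ⟨fun _ => ?_, fun _ => rfl⟩
      rintro ⟨⟨b1, b2, b3, b4⟩, m1, m2, m3, m4⟩
      rcases h4 with h | h | h | h | h <;> first | omega | exact h m4
    · constructor
      · intro hf; exact hf.elim
      · intro hn
        exfalso; apply hn
        push Not at h1 h2 h3 h4
        obtain ⟨a1, a2, a3, a4, a5⟩ := h1
        obtain ⟨c1, c2, c3, c4, c5⟩ := h2
        obtain ⟨d1, d2, d3, d4, d5⟩ := h3
        obtain ⟨e1, e2, e3, e4, e5⟩ := h4
        exact ⟨⟨by omega, by omega, by omega, by omega⟩, a5, c5, d5, e5⟩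
  rw [Bool.eq_iff_iff, Bool.not_eq_true', Bool.eq_false_iff, Ne, PySem.Set.contains_iff, hmem]
  exact hiff

-- ===== VERDICT (by name: the statement is the Claim_ definition above) =====
theorem extract_boundary_pixels_spec : Claim_equal_extract_boundary_pixels := by
  intro coords width height _
  unfold Spec_extract_boundary_pixels extract_boundary_pixels extract_boundary_pixels_alt
  rw [PySem.List.foldl_append_if
    (fun p => pvDirLoop (PySem.Set.ofList coords) width height p.1 p.2 [(-1, 0), (1, 0), (0, -1), (0, 1)])
    (fun p => (p.1, p.2)) coords []]
  simp only [List.nil_append]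
  rw [List.filter_congr (fun p hp => predicate_eq coords width height p hp)]
  simp
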